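-- pv_equiv track=rewrite | github.com/katya-avem/soviet_plays | src/txt_to_xml.py | mark_up_author_title
-- ===== SOURCE A (Python) =====
-- def find_block_between_empty_lines(lines: list, block_index: int) -> tuple:
--     count = 0
--     block_start_index = -1
--     block_end_index = -1
--     block_lines = []
--
--     for index, line in enumerate(lines):
--         if len(line.strip()) == 0:
--             count += 1
--
--             if count == block_index + 1:
--                 block_end_index = index
--                 break
--
--             continue
--
--         if count == block_index:
--             if block_start_index == -1:
--                 block_start_index = index
--
--             block_lines.append(line)
--
--     if block_start_index != -1 and block_end_index == -1:
--         block_end_index = len(lines)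
--
--     return block_start_index, block_end_index, block_lines
--
-- def mark_up_author_title(lines: list) -> list:
--     block_start_index, block_end_index, block_lines = find_block_between_empty_lines(lines, 0)
--
--     assert block_start_index == 0
--     assert block_end_index != -1
--
--     return [
--         f"<docAuthor>{block_lines[0].strip()}</docAuthor>\n",
--         "<docTitle>\n",
--         f"<titlePart title=\"main\">{block_lines[1].strip()}</titlePart>\n",
--         *[f"<titlePart title=\"sub\">{line.strip()}</titlePart>\n" for line in block_lines[2:]],
--         "</docTitle>\n",
--         *lines[block_end_index:]
--     ]
-- ===== SOURCE B (Python) =====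
-- def mark_up_author_title(lines: list) -> list:
--     # One full pass with a boolean state partitions the input into the stripped
--     # header block and the untouched tail; no indices, no break, no slicing.
--     block, tail, in_block = [], [], True
--     for line in lines:
--         if in_block and not line.strip():
--             in_block = False
--         if in_block:
--             block.append(line.strip())
--         else:
--             tail.append(line)
--     author, main, *subs = block
--     return [
--         f"<docAuthor>{author}</docAuthor>\n",
--         "<docTitle>\n",
--         f'<titlePart title="main">{main}</titlePart>\n',
--         *[f'<titlePart title="sub">{s}</titlePart>\n' for s in subs],
--         "</docTitle>\n",
--         *tail,
--     ]
-- ===== Notes on version B (the rewrite author's own statement) =====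
-- stated objective: alternative
-- what changed: Replaces A's counter/index-tracking helper (block_start/block_end, break, then slicing lines[block_end:]) with a single full pass over all lines that partitions them via an in_block flag into the already-stripped header block and the untouched tail, assembled by tuple unpacking; no indices, no break, no slices.
import Mathlib
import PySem

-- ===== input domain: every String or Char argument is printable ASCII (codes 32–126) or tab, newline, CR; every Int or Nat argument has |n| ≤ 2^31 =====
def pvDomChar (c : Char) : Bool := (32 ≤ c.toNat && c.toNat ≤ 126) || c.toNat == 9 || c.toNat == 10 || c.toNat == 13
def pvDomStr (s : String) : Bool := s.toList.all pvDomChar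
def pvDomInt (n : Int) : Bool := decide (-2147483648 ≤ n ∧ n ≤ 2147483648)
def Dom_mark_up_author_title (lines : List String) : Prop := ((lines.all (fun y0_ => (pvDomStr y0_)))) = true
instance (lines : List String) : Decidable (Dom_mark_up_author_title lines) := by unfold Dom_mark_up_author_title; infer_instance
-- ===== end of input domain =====

-- B drops A's index-tracking helper with its counter and break and instead partitions the
-- whole list in one stateful pass into the stripped header block and the untouched tail:
-- a different decomposition, same cost, same return value on Pre_.

-- ===== PORT A =====
-- 'len(line.strip()) == 0'
def pvBlank (l : String) : Bool := PySem.Str.len (PySem.Str.strip l) == 0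

-- the for-loop of find_block_between_empty_lines, with break modelled by returning
def pvFindLoop (rest : List String) (idx block_index count bsi bei : Int) (bl : List String) :
    Int × Int × List String :=
  match rest with
  | [] => (bsi, bei, bl)
  | l :: rs =>
    if pvBlank l then
      let count := count + 1
      if count == block_index + 1 then (bsi, idx, bl)   -- break
      else pvFindLoop rs (idx + 1) block_index count bsi bei bl
    else
      if count == block_index then
        let bsi := if bsi == -1 then idx else bsi
        pvFindLoop rs (idx + 1) block_index count bsi bei (bl ++ [l])
      else pvFindLoop rs (idx + 1) block_index count bsi bei bl

def find_block_between_empty_lines (lines : List String) (block_index : Int) :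
    Int × Int × List String :=
  let r := pvFindLoop lines 0 block_index 0 (-1) (-1) []
  if r.1 != -1 && r.2.1 == -1 then (r.1, (lines.length : Int), r.2.2) else r

def mark_up_author_title (lines : List String) : List String :=
  let r := find_block_between_empty_lines lines 0
  let bei := r.2.1
  let bl := r.2.2
  -- the asserts and the block_lines[0]/[1] indexing raise outside Pre_; pyGet? with default ""
  -- is only reached there
  [ "<docAuthor>" ++ PySem.Str.strip ((PySem.List.pyGet? bl 0).getD "") ++ "</docAuthor>\n",
    "<docTitle>\n",
    "<titlePart title=\"main\">" ++ PySem.Str.strip ((PySem.List.pyGet? bl 1).getD "") ++ "</titlePart>\n" ]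
  ++ (PySem.List.slice bl (some 2) none).map
       (fun l => "<titlePart title=\"sub\">" ++ PySem.Str.strip l ++ "</titlePart>\n")
  ++ ["</docTitle>\n"]
  ++ PySem.List.slice lines (some bei) none

-- ===== PORT B =====
-- the for-loop of Source B: partition into (stripped block, tail) with the in_block flag
def pvPartLoop (rest block tail : List String) (inb : Bool) : List String × List String :=
  match rest with
  | [] => (block, tail)
  | l :: rs =>
    let inb := if inb && (PySem.Str.strip l == "") then false else inb
    if inb then pvPartLoop rs (block ++ [PySem.Str.strip l]) tail inb
    else pvPartLoop rs block (tail ++ [l]) inb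

def mark_up_author_title_alt (lines : List String) : List String :=
  match pvPartLoop lines [] [] true with
  | (author :: main :: subs, tail) =>
      [ "<docAuthor>" ++ author ++ "</docAuthor>\n",
        "<docTitle>\n",
        "<titlePart title=\"main\">" ++ main ++ "</titlePart>\n" ]
      ++ subs.map (fun s => "<titlePart title=\"sub\">" ++ s ++ "</titlePart>\n")
      ++ ["</docTitle>\n"]
      ++ tail
  | _ => []   -- the Python B raises here (unpacking fewer than 2 values); outside Pre_

-- ===== PRECONDITION & SPEC =====
-- Pre_ excludes exactly the inputs where A raises (AssertionError when the first line is
-- missing/blank, IndexError when the first block has fewer than two lines); B raises there too.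
def Pre_mark_up_author_title (lines : List String) : Prop :=
  2 ≤ lines.length ∧
  PySem.Str.len (PySem.Str.strip (lines.getD 0 "")) ≠ 0 ∧
  PySem.Str.len (PySem.Str.strip (lines.getD 1 "")) ≠ 0
instance (lines : List String) : Decidable (Pre_mark_up_author_title lines) := by
  unfold Pre_mark_up_author_title; infer_instance
def pvWitness_mark_up_author_title : List String := ["Au", "Ti", "sub", "", "rest"]

def Spec_mark_up_author_title (lines : List String) (out : List String) : Prop := out = mark_up_author_title_alt lines
instance (lines : List String) (out : List String) : Decidable (Spec_mark_up_author_title lines out) := by unfold Spec_mark_up_author_title; infer_instance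

-- ===== CLAIM (what is proved, stated in full; the proofs are below) =====
def Claim_equal_mark_up_author_title : Prop := ∀ (lines : List String), Dom_mark_up_author_title lines → Pre_mark_up_author_title lines → Spec_mark_up_author_title lines (mark_up_author_title lines)

-- ===== LEMMAS AND PROOFS =====

-- A's loop with block_index = 0, count = 0 and block_start already set, characterised by
-- the first blank index of the remaining lines
lemma pvFindLoop_zero (rest : List String) :
    ∀ (idx s : Int) (bl : List String), s ≠ -1 →
    pvFindLoop rest idx 0 0 s (-1) bl =
      match rest.findIdx? pvBlank with
      | some j => (s, idx + (j : Int), bl ++ rest.take j)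
      | none => (s, -1, bl ++ rest) := by
  induction rest with
  | nil => intro idx s bl _; simp [pvFindLoop]
  | cons l rs ih =>
    intro idx s bl hs
    by_cases hb : pvBlank l
    · simp [pvFindLoop, hb, List.findIdx?_cons]
    · have hsb : (s == -1) = false := by simpa using hs
      simp only [pvFindLoop, hb, Bool.false_eq_true, if_true, beq_self_eq_true,
        List.findIdx?_cons, hsb, if_false, ih (idx + 1) s (bl ++ [l]) hs]
      cases h : rs.findIdx? pvBlank with
      | none => simp
      | some j =>
        simp [List.take_succ_cons]
        ring

-- 'not line.strip()' in B and 'len(line.strip()) == 0' in A test the same thing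
lemma pvBlank_eq (l : String) : (PySem.Str.strip l == "") = pvBlank l := by
  simp [pvBlank, PySem.Str.len, PySem.Str.strip]

-- once in_block is false B's loop only appends to the tail
lemma pvPartLoop_false (rest : List String) :
    ∀ (block tail : List String), pvPartLoop rest block tail false = (block, tail ++ rest) := by
  induction rest with
  | nil => intro block tail; simp [pvPartLoop]
  | cons l rs ih => intro block tail; simp [pvPartLoop, ih]

-- B's loop with in_block = true, characterised by the first blank index
lemma pvPartLoop_true (rest : List String) :
    ∀ (block tail : List String),
    pvPartLoop rest block tail true =
      match rest.findIdx? pvBlank with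
      | some j => (block ++ (rest.take j).map PySem.Str.strip, tail ++ rest.drop j)
      | none => (block ++ rest.map PySem.Str.strip, tail) := by
  induction rest with
  | nil => intro block tail; simp [pvPartLoop]
  | cons l rs ih =>
    intro block tail
    by_cases hb : pvBlank l
    · simp [pvPartLoop, pvBlank_eq, hb, List.findIdx?_cons, pvPartLoop_false]
    · simp only [pvPartLoop, pvBlank_eq, hb, Bool.and_false, if_true, reduceIte,
        List.findIdx?_cons, Bool.false_eq_true, ih]
      cases h : rs.findIdx? pvBlank with
      | none => simp
      | some j => simp [List.take_succ_cons]

-- slices of a two-cons list, via slice_from_natCast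
lemma pvSlice2 (x y : String) (l : List String) :
    PySem.List.slice (x :: y :: l) (some 2) none = l := by
  have : ((2 : Nat) : Int) = 2 := by norm_num
  rw [← this, PySem.List.slice_from_natCast]
  simp

lemma pvSliceJ (x y : String) (l : List String) (j : Nat) :
    PySem.List.slice (x :: y :: l) (some (2 + (j : Int))) none = l.drop j := by
  have : (((j + 2) : Nat) : Int) = 2 + (j : Int) := by push_cast; ring
  rw [← this, PySem.List.slice_from_natCast]
  simp [List.drop_succ_cons]

theorem mark_up_author_title_spec : Claim_equal_mark_up_author_title := by
  intro lines _hdom hpre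
  obtain ⟨hlen, h0, h1⟩ := hpre
  rcases lines with _ | ⟨a, _ | ⟨b, rest⟩⟩
  · simp at hlen
  · simp at hlen
  · have ha : pvBlank a = false := by
      simp [pvBlank] at h0 ⊢; simpa using h0
    have hb : pvBlank b = false := by
      simp [pvBlank] at h1 ⊢; simpa using h1
    unfold Spec_mark_up_author_title mark_up_author_title mark_up_author_title_alt
      find_block_between_empty_lines
    have e0 : (((0:Int) == -1)) = false := by decide
    simp only [pvFindLoop, pvPartLoop, pvBlank_eq, ha, hb, e0, Bool.false_eq_true, Bool.and_false,
      if_false, if_true, beq_self_eq_true]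
    rw [pvFindLoop_zero rest _ _ _ (by decide), pvPartLoop_true]
    cases h : rest.findIdx? pvBlank with
    | some j =>
      have hne : ¬ ((2 : Int) + (j : Int) = -1) := by omega
      have p1 : (0 : Int) ≤ min (j : Int) (rest.length : Int) + 1 := by
        have := Int.le_min.mpr ⟨Int.natCast_nonneg j, Int.natCast_nonneg rest.length⟩; omega
      simp [hne, p1, pvSlice2, pvSliceJ, Function.comp_def, PySem.List.pyGet?, PySem.List.pyIdx?]
    | none =>
      have hr : ((rest.length : Int) + 1 + 1) = 2 + (rest.length : Int) := by ring
      have p2 : (0 : Int) < 2 + (rest.length : Int) := by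
        have := Int.natCast_nonneg rest.length; omega
      have p3 : (1 : Int) < 2 + (rest.length : Int) := by
        have := Int.natCast_nonneg rest.length; omega
      simp [hr, p2, p3, pvSlice2, pvSliceJ, Function.comp_def, PySem.List.pyGet?, PySem.List.pyIdx?]
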